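-- pv_equiv track=rewrite | github.com/ludocomito/GNN-Route-Recommendation | main.py | remove_loops
-- ===== SOURCE A (Python) =====
-- def remove_loops(path):
-- 	reduced = []
-- 	last_occ = {p:-1 for p in path}
-- 	for i in range(len(path)-1,-1,-1):
-- 		if last_occ[path[i]] == -1:
-- 			last_occ[path[i]] = i
-- 	current = 0
-- 	while(current < len(path)):
-- 		reduced.append(path[current])
-- 		current = last_occ[path[current]] + 1
-- 	return reduced
-- ===== SOURCE B (Python) =====
-- def remove_loops(path):
-- 	reduced = []
-- 	pos = {}
-- 	for x in path:
-- 		if x in pos: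
-- 			i = pos[x]
-- 			for y in reduced[i+1:]:
-- 				del pos[y]
-- 			del reduced[i+1:]
-- 		else:
-- 			pos[x] = len(reduced)
-- 			reduced.append(x)
-- 	return reduced
-- ===== Notes on version B (the rewrite author's own statement) =====
-- stated objective: alternative
-- what changed: A precomputes a last-occurrence dict in a backward pass and then walks the path by jumping past each node's last occurrence; B does one forward pass keeping a loop-free stack plus a position dict, truncating the stack (and purging the dict) when a node repeats.
import Mathlib
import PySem

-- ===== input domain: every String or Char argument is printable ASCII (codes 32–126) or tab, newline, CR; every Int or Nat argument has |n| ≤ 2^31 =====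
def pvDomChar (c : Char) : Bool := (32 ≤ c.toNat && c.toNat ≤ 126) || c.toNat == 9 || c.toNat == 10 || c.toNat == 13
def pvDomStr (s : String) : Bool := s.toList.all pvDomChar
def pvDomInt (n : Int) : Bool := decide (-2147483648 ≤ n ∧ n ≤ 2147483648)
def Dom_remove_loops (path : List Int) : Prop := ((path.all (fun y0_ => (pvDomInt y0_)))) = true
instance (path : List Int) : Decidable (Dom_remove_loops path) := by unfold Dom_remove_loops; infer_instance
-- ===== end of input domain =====

-- B replaces A's two-pass last-occurrence-dict + jump loop by a single forward pass keeping a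
-- loop-free stack with a position dict (objective: a structurally different single-pass alternative).

-- ===== PORT A =====
-- A's while loop: 'current' strictly increases each iteration (the last occurrence of
-- path[current] is ≥ current), so path.length iterations of fuel always suffice; the fuel
-- only makes the same computation total.
def remove_loops_loop (path : List Int) (lastOcc : PySem.Dict Int Int) : Nat → Int → List Int
  | 0, _ => []
  | fuel + 1, current =>
    if current < (path.length : Int) then
      PySem.List.pyGetD path current 0 ::
        remove_loops_loop path lastOcc fuel
          (lastOcc.getD (PySem.List.pyGetD path current 0) 0 + 1)
    else []

def remove_loops (path : List Int) : List Int :=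
  let lastOcc0 : PySem.Dict Int Int := path.foldl (fun d p => d.insert p (-1)) PySem.Dict.empty
  let lastOcc : PySem.Dict Int Int :=
    (PySem.List.pyRange ((path.length : Int) - 1) (-1) (-1)).foldl
      (fun d i =>
        if d.getD (PySem.List.pyGetD path i 0) 0 = -1
        then d.insert (PySem.List.pyGetD path i 0) i else d)
      lastOcc0
  remove_loops_loop path lastOcc path.length 0

-- ===== PORT B =====
def remove_loops_step (st : List Int × PySem.Dict Int Int) (x : Int) :
    List Int × PySem.Dict Int Int :=
  match st.2.get? x with
  | some i =>
      (PySem.List.slice st.1 none (some (i + 1)),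
       (PySem.List.slice st.1 (some (i + 1)) none).foldl (fun d y => d.erase y) st.2)
  | none => (st.1 ++ [x], st.2.insert x (st.1.length : Int))

def remove_loops_alt (path : List Int) : List Int :=
  (path.foldl remove_loops_step ([], PySem.Dict.empty)).1

-- ===== PRECONDITION & SPEC =====
def Spec_remove_loops (path : List Int) (out : List Int) : Prop := out = remove_loops_alt path
instance (path : List Int) (out : List Int) : Decidable (Spec_remove_loops path out) := by unfold Spec_remove_loops; infer_instance

-- ===== CLAIM (what is proved, stated in full; the proofs are below) =====
def Claim_equal_remove_loops : Prop := ∀ (path : List Int), Dom_remove_loops path → Spec_remove_loops path (remove_loops path)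

-- ===== LEMMAS AND PROOFS =====

-- Common specification: remove the loop at the head by jumping past its last occurrence.
def dropA (x : Int) (rest : List Int) : List Int :=
  rest.drop (rest.length - rest.reverse.idxOf x)

theorem dropA_length_le (x : Int) (rest : List Int) : (dropA x rest).length ≤ rest.length := by
  simp [dropA]

def specRec : List Int → List Int
  | [] => []
  | x :: rest => x :: specRec (dropA x rest)
termination_by l => l.length
decreasing_by
  have := dropA_length_le x rest
  simpa using Nat.lt_succ_of_le this

theorem specRec_cons (x : Int) (rest : List Int) :
    specRec (x :: rest) = x :: specRec (dropA x rest) := by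
  rw [specRec]

theorem dropA_of_not_mem {x : Int} {rest : List Int} (h : x ∉ rest) : dropA x rest = rest := by
  have hidx : rest.reverse.idxOf x = rest.reverse.length :=
    List.idxOf_eq_length (by simpa using h)
  simp [dropA, hidx]

theorem dropA_last (u v : List Int) (x : Int) (h : x ∉ v) : dropA x (u ++ x :: v) = v := by
  have hrev : (u ++ x :: v).reverse = v.reverse ++ x :: u.reverse := by simp
  have hidx : (u ++ x :: v).reverse.idxOf x = v.length := by
    rw [hrev, List.idxOf_append_of_notMem (by simpa using h)]
    simp
  have hlen : (u ++ x :: v).length - v.length = u.length + 1 := by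
    simp; omega
  have hsplit : u ++ x :: v = (u ++ [x]) ++ v := by simp
  rw [dropA, hidx, hlen, hsplit]
  have : u.length + 1 = (u ++ [x]).length := by simp
  rw [this, List.drop_left]

theorem decomp_last {x : Int} {l : List Int} (h : x ∈ l) :
    ∃ u v, l = u ++ x :: v ∧ x ∉ v := by
  induction l with
  | nil => cases h
  | cons z t ih =>
    by_cases ht : x ∈ t
    · obtain ⟨u, v, rfl, hv⟩ := ih ht
      exact ⟨z :: u, v, rfl, hv⟩
    · have hx : x = z := by cases List.mem_cons.mp h with
        | inl h' => exact h'
        | inr h' => exact absurd h' ht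
      exact ⟨[], t, by simp [hx], ht⟩

-- last-occurrence index of x in path, as used by specRec/A
def lastN (path : List Int) (x : Int) : Nat :=
  path.length - 1 - path.reverse.idxOf x

theorem lastN_decomp (u v : List Int) (x : Int) (h : x ∉ v) :
    lastN (u ++ x :: v) x = u.length := by
  have hrev : (u ++ x :: v).reverse = v.reverse ++ x :: u.reverse := by simp
  have hidx : (u ++ x :: v).reverse.idxOf x = v.length := by
    rw [hrev, List.idxOf_append_of_notMem (by simpa using h)]
    simp
  unfold lastN
  rw [hidx]
  simp only [List.length_append, List.length_cons]
  omega

-- Dict facts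
theorem find_filter (l : List (Int × Int)) (k x : Int) :
    (l.filter (fun p => !(p.1 == k))).find? (fun p => p.1 == x) =
      if x = k then none else l.find? (fun p => p.1 == x) := by
  induction l with
  | nil => simp
  | cons p rest ih =>
    rw [List.filter_cons]
    by_cases hpk : p.1 = k
    · rw [if_neg (by simp [hpk]), ih]
      by_cases hxk : x = k
      · rw [if_pos hxk, if_pos hxk]
      · rw [if_neg hxk, if_neg hxk,
          List.find?_cons_of_neg (l := _) (by simp [hpk]; omega)]
    · rw [if_pos (by simp [hpk])]
      by_cases hpx : p.1 = x
      · have hxk : ¬ x = k := by omega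
        rw [List.find?_cons_of_pos (l := _) (by simp [hpx]), if_neg hxk,
          List.find?_cons_of_pos (l := _) (by simp [hpx])]
      · rw [List.find?_cons_of_neg (l := _) (by simp [hpx]), ih]
        by_cases hxk : x = k
        · rw [if_pos hxk, if_pos hxk]
        · rw [if_neg hxk, if_neg hxk, List.find?_cons_of_neg (l := _) (by simp [hpx])]

theorem my_get?_erase (d : PySem.Dict Int Int) (k x : Int) :
    (d.erase k).get? x = if x = k then none else d.get? x := by
  obtain ⟨items⟩ := d
  simp only [PySem.Dict.erase, PySem.Dict.get?]
  rw [find_filter]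
  split <;> rfl

theorem get?_eraseFold (l : List Int) (d : PySem.Dict Int Int) (x : Int) :
    (l.foldl (fun d y => d.erase y) d).get? x = if x ∈ l then none else d.get? x := by
  induction l generalizing d with
  | nil => simp
  | cons y t ih =>
    simp only [List.foldl_cons, ih, my_get?_erase]
    by_cases hx : x = y <;> simp [hx, List.mem_cons]

theorem getD_foldl_insert_const (l : List Int) (d : PySem.Dict Int Int) (x c d0 : Int) :
    (l.foldl (fun d p => d.insert p c) d).getD x d0 = if x ∈ l then c else d.getD x d0 := by
  induction l generalizing d with
  | nil => simp
  | cons y t ih =>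
    simp only [List.foldl_cons, ih, PySem.Dict.getD_insert]
    by_cases hm : x ∈ t <;> by_cases hx : x = y <;> simp [hm, hx]

-- ===== A side =====

def InvA (path : List Int) (m : Nat) (d : PySem.Dict Int Int) : Prop :=
  ∀ x, x ∈ path → d.getD x 0 = if x ∈ path.drop m then ((lastN path x : Nat) : Int) else -1

theorem lastN_here (path : List Int) (m : Nat) (hm : m < path.length)
    (hno : path[m] ∉ path.drop (m + 1)) : lastN path (path[m]) = m := by
  have hsplit : path = path.take m ++ path[m] :: path.drop (m + 1) := by
    conv_lhs => rw [← List.take_append_drop m path]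
    rw [List.drop_eq_getElem_cons hm]
  have := lastN_decomp (path.take m) (path.drop (m + 1)) (path[m]) hno
  rw [← hsplit] at this
  rwa [List.length_take, Nat.min_eq_left (Nat.le_of_lt hm)] at this

theorem foldBack (path : List Int) :
    ∀ (m : Nat), m ≤ path.length → ∀ d, InvA path m d →
      InvA path 0 ((PySem.List.pyRange ((m : Int) - 1) (-1) (-1)).foldl
        (fun d i =>
          if d.getD (PySem.List.pyGetD path i 0) 0 = -1
          then d.insert (PySem.List.pyGetD path i 0) i else d) d) := by
  intro m
  induction m with
  | zero =>
    intro _ d hd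
    rw [PySem.List.pyRange_neg_one_eq_nil (by norm_num)]
    simpa using hd
  | succ m ih =>
    intro hm d hd
    have hmlt : m < path.length := hm
    have hcast : ((m + 1 : Nat) : Int) - 1 = (m : Int) := by push_cast; ring
    rw [hcast, PySem.List.pyRange_neg_one_cons (by omega)]
    rw [List.foldl_cons]
    have hget : PySem.List.pyGetD path (m : Int) 0 = path[m] := by
      rw [PySem.List.pyGetD_natCast, List.getD_eq_getElem _ _ hmlt]
    have hdrop : path.drop m = path[m] :: path.drop (m + 1) := List.drop_eq_getElem_cons hmlt
    have hmem : path[m] ∈ path := List.getElem_mem hmlt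
    apply ih (Nat.le_of_lt hmlt)
    by_cases hin : path[m] ∈ path.drop (m + 1)
    · -- already set to its (nonneg) last index: condition false, dict unchanged
      have hval : d.getD (path[m]) 0 = ((lastN path (path[m]) : Nat) : Int) := by
        rw [hd _ hmem]; simp [hin]
      have hcond : ¬ (d.getD (PySem.List.pyGetD path (m : Int) 0) 0 = -1) := by
        rw [hget, hval]; omega
      rw [if_neg hcond]
      intro x hx
      rw [hd _ hx]
      by_cases hxm : x = path[m]
      · subst hxm
        have hmm : path[m] ∈ path.drop m := by
          rw [hdrop]; exact List.mem_cons_self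
        rw [if_pos hin, if_pos hmm]
      · have hmm : x ∈ path.drop m ↔ x ∈ path.drop (m + 1) := by
          rw [hdrop, List.mem_cons]; simp [hxm]
        simp only [hmm]
    · -- first (backward) visit: set to m, which is the last index
      have hval : d.getD (path[m]) 0 = -1 := by rw [hd _ hmem]; simp [hin]
      have hcond : d.getD (PySem.List.pyGetD path (m : Int) 0) 0 = -1 := by rw [hget, hval]
      rw [if_pos hcond, hget]
      intro x hx
      rw [PySem.Dict.getD_insert]
      by_cases hxm : x = path[m]
      · subst hxm
        have hmm : path[m] ∈ path.drop m := by
          rw [hdrop]; exact List.mem_cons_self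
        rw [if_pos rfl, if_pos hmm, lastN_here path m hmlt hin]
      · rw [if_neg hxm, hd _ hx]
        have hmm : x ∈ path.drop m ↔ x ∈ path.drop (m + 1) := by
          rw [hdrop, List.mem_cons]; simp [hxm]
        simp only [hmm]

theorem loopA_eq (path : List Int) (d : PySem.Dict Int Int) (hd : InvA path 0 d) :
    ∀ (fuel c : Nat), path.length ≤ fuel + c →
      remove_loops_loop path d fuel (c : Int) = specRec (path.drop c) := by
  intro fuel
  induction fuel with
  | zero =>
    intro c hc
    rw [List.drop_eq_nil_of_le (by omega)]
    simp [remove_loops_loop, specRec]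
  | succ fuel ih =>
    intro c hc
    by_cases hlt : c < path.length
    · have hcast : ((c : Int) < (path.length : Int)) := by exact_mod_cast hlt
      rw [remove_loops_loop, if_pos hcast]
      have hget : PySem.List.pyGetD path (c : Int) 0 = path[c] := by
        rw [PySem.List.pyGetD_natCast, List.getD_eq_getElem _ _ hlt]
      set y := path[c] with hy
      have hmem : y ∈ path := List.getElem_mem hlt
      obtain ⟨u, v, hsplit, hv⟩ := decomp_last hmem
      have hlast : lastN path y = u.length := by rw [hsplit]; exact lastN_decomp u v y hv
      have hlen : path.length = u.length + 1 + v.length := by rw [hsplit]; simp; omega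
      have hcle : c ≤ u.length := by
        by_contra hgt
        rw [Nat.not_le] at hgt
        have hdropv : path.drop (u.length + 1) = v := by
          rw [hsplit]
          have : u ++ y :: v = (u ++ [y]) ++ v := by simp
          rw [this]
          have : u.length + 1 = (u ++ [y]).length := by simp
          rw [this, List.drop_left]
        have hlt2 : c - u.length - 1 < (path.drop (u.length + 1)).length := by
          simp [List.length_drop]; omega
        have hy2 : (path.drop (u.length + 1))[c - u.length - 1]'hlt2 = path[c] := by
          rw [List.getElem_drop]
          congr 1
          omega
        have hyv : y ∈ path.drop (u.length + 1) := by
          rw [hy, ← hy2]; exact List.getElem_mem _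
        rw [hdropv] at hyv
        exact hv hyv
      have hval : d.getD y 0 = ((u.length : Nat) : Int) := by
        rw [hd _ hmem]
        simp [hlast, hmem]
      -- path.drop c = y' :: path.drop (c+1), with dropA collapsing to v
      have hdropc : path.drop c = path[c] :: path.drop (c + 1) := List.drop_eq_getElem_cons hlt
      have hdropv : path.drop (u.length + 1) = v := by
        rw [hsplit]
        have h1 : u ++ y :: v = (u ++ [y]) ++ v := by simp
        rw [h1]
        have h2 : u.length + 1 = (u ++ [y]).length := by simp
        rw [h2, List.drop_left]
      have hdropA : dropA y (path.drop (c + 1)) = v := by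
        by_cases hcu : c = u.length
        · rw [hcu, hdropv]; exact dropA_of_not_mem hv
        · have hclt : c + 1 ≤ u.length := by omega
          have : path.drop (c + 1) = u.drop (c + 1) ++ y :: v := by
            rw [hsplit, List.drop_append_of_le_length hclt]
          rw [this]
          exact dropA_last _ v y hv
      rw [hget, hval]
      have hnext : ((u.length : Nat) : Int) + 1 = ((u.length + 1 : Nat) : Int) := by push_cast; ring
      rw [hnext, ih (u.length + 1) (by omega), hdropc, ← hy]
      rw [specRec_cons, hdropA, hdropv]
    · rw [List.drop_eq_nil_of_le (by omega)]
      rw [remove_loops_loop, if_neg (by exact_mod_cast hlt)]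
      simp [specRec]

theorem remove_loops_eq_specRec (path : List Int) : remove_loops path = specRec path := by
  unfold remove_loops
  have hinvN : InvA path path.length
      (path.foldl (fun d p => d.insert p (-1)) PySem.Dict.empty) := by
    intro x hx
    rw [getD_foldl_insert_const]
    simp [hx, List.drop_length]
  have hinv0 := foldBack path path.length le_rfl _ hinvN
  have := loopA_eq path _ hinv0 path.length 0 (by omega)
  simpa using this

-- ===== B side =====

def CanB (r : List Int) (pos : PySem.Dict Int Int) : Prop :=
  r.Nodup ∧ ∀ x : Int, pos.get? x = if x ∈ r then some ((r.idxOf x : Nat) : Int) else none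

theorem CanB_empty : CanB [] PySem.Dict.empty := by
  constructor
  · exact List.nodup_nil
  · intro x; simp

theorem stepB_mem {r : List Int} {pos : PySem.Dict Int Int} (h : CanB r pos) {y : Int}
    (hy : y ∈ r) :
    ∃ pos', remove_loops_step (r, pos) y = (r.take (r.idxOf y + 1), pos') ∧
      CanB (r.take (r.idxOf y + 1)) pos' := by
  obtain ⟨hnd, hget⟩ := h
  have hgy : pos.get? y = some ((r.idxOf y : Nat) : Int) := by rw [hget, if_pos hy]
  refine ⟨(r.drop (r.idxOf y + 1)).foldl (fun d y => d.erase y) pos, ?_, ?_⟩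
  · simp only [remove_loops_step, hgy]
    have hcast : ((r.idxOf y : Nat) : Int) + 1 = ((r.idxOf y + 1 : Nat) : Int) := by
      push_cast; ring
    rw [hcast, PySem.List.slice_to_natCast, PySem.List.slice_from_natCast]
  · constructor
    · exact hnd.sublist (List.take_sublist _ _)
    · intro x
      rw [get?_eraseFold]
      have hdisj : ∀ z, z ∈ r.take (r.idxOf y + 1) → z ∉ r.drop (r.idxOf y + 1) := by
        have : (r.take (r.idxOf y + 1) ++ r.drop (r.idxOf y + 1)).Nodup := by
          rw [List.take_append_drop]; exact hnd
        intro z hz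
        exact fun hzd => (List.nodup_append.mp this).2.2 z hz z hzd rfl
      by_cases hxt : x ∈ r.take (r.idxOf y + 1)
      · rw [if_neg (hdisj x hxt), if_pos hxt, hget,
          if_pos (List.mem_of_mem_take hxt)]
        have : r.idxOf x = (r.take (r.idxOf y + 1)).idxOf x := by
          conv_lhs => rw [← List.take_append_drop (r.idxOf y + 1) r]
          exact List.idxOf_append_of_mem hxt
        rw [this]
      · by_cases hxd : x ∈ r.drop (r.idxOf y + 1)
        · rw [if_pos hxd, if_neg hxt]
        · have hxr : x ∉ r := by
            intro hx
            rw [← List.take_append_drop (r.idxOf y + 1) r] at hx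
            rcases List.mem_append.mp hx with h' | h'
            · exact hxt h'
            · exact hxd h'
          rw [if_neg hxd, if_neg hxt, hget, if_neg hxr]

theorem stepB_not_mem {r : List Int} {pos : PySem.Dict Int Int} (h : CanB r pos) {y : Int}
    (hy : y ∉ r) :
    remove_loops_step (r, pos) y = (r ++ [y], pos.insert y (r.length : Int)) ∧
      CanB (r ++ [y]) (pos.insert y (r.length : Int)) := by
  obtain ⟨hnd, hget⟩ := h
  have hgy : pos.get? y = none := by rw [hget]; simp [hy]
  refine ⟨?_, ?_, ?_⟩
  · simp only [remove_loops_step, hgy]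
  · simp [List.nodup_append, hnd]
    intro a ha hay
    exact hy (hay ▸ ha)
  · intro x
    rw [PySem.Dict.get?_insert]
    by_cases hx : x = y
    · subst hx
      rw [if_pos rfl, if_pos (by simp)]
      rw [List.idxOf_append_of_notMem hy]
      simp
    · rw [if_neg hx, hget]
      by_cases hxr : x ∈ r
      · rw [if_pos hxr, if_pos (by simp [hxr])]
        rw [List.idxOf_append_of_mem hxr]
      · rw [if_neg hxr, if_neg (by simp [hxr, hx])]

theorem foldB_shape :
    ∀ (s t : List Int) (pos : PySem.Dict Int Int) (x : Int), CanB (x :: t) pos →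
      ∃ t' pos', s.foldl remove_loops_step (x :: t, pos) = (x :: t', pos') ∧
        CanB (x :: t') pos' := by
  intro s
  induction s with
  | nil => intro t pos x h; exact ⟨t, pos, rfl, h⟩
  | cons y s ih =>
    intro t pos x h
    rw [List.foldl_cons]
    by_cases hy : y ∈ x :: t
    · obtain ⟨pos', heq, hcan⟩ := stepB_mem h hy
      rw [heq]
      have htake : (x :: t).take ((x :: t).idxOf y + 1) = x :: t.take ((x :: t).idxOf y) := by
        rfl
      rw [htake] at hcan ⊢
      exact ih _ _ _ hcan
    · obtain ⟨heq, hcan⟩ := stepB_not_mem h hy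
      rw [heq]
      have happ : (x :: t) ++ [y] = x :: (t ++ [y]) := by simp
      rw [happ] at hcan ⊢
      exact ih _ _ _ hcan

theorem foldB_shift :
    ∀ (s : List Int) (x : Int) (r : List Int) (pos pos₂ : PySem.Dict Int Int), x ∉ s →
      CanB (x :: r) pos → CanB r pos₂ →
      (s.foldl remove_loops_step (x :: r, pos)).1 =
        x :: (s.foldl remove_loops_step (r, pos₂)).1 := by
  intro s
  induction s with
  | nil => intro x r pos pos₂ _ _ _; rfl
  | cons y s ih =>
    intro x r pos pos₂ hxs h h₂
    have hyx : y ≠ x := by intro he; exact hxs (by simp [he])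
    have hxs' : x ∉ s := fun hx => hxs (by simp [hx])
    rw [List.foldl_cons, List.foldl_cons]
    by_cases hyr : y ∈ r
    · have hyxr : y ∈ x :: r := by simp [hyr]
      obtain ⟨pos', heq, hcan⟩ := stepB_mem h hyxr
      obtain ⟨pos₂', heq₂, hcan₂⟩ := stepB_mem h₂ hyr
      rw [heq, heq₂]
      have hidx : (x :: r).idxOf y = r.idxOf y + 1 := List.idxOf_cons_ne r (Ne.symm hyx)
      have htake : (x :: r).take ((x :: r).idxOf y + 1) = x :: r.take (r.idxOf y + 1) := by
        rw [hidx]; rfl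
      rw [htake] at hcan ⊢
      exact ih x _ _ _ hxs' hcan hcan₂
    · have hyxr : y ∉ x :: r := by simp [hyr, Ne.symm hyx, hyx]
      obtain ⟨heq, hcan⟩ := stepB_not_mem h hyxr
      obtain ⟨heq₂, hcan₂⟩ := stepB_not_mem h₂ hyr
      rw [heq, heq₂]
      have happ : (x :: r) ++ [y] = x :: (r ++ [y]) := by simp
      rw [happ] at hcan ⊢
      exact ih x _ _ _ hxs' hcan hcan₂

theorem remove_loops_alt_eq_specRec (path : List Int) :
    remove_loops_alt path = specRec path := by
  have main : ∀ (n : Nat) (p : List Int), p.length ≤ n → remove_loops_alt p = specRec p := by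
    intro n
    induction n with
    | zero =>
      intro p hp
      have : p = [] := List.eq_nil_of_length_eq_zero (by omega)
      subst this
      simp [remove_loops_alt, specRec]
    | succ n ih =>
      intro p hp
      match p with
      | [] => simp [remove_loops_alt, specRec]
      | x :: rest =>
        have hstep : remove_loops_step ([], PySem.Dict.empty) x =
            ([x], PySem.Dict.empty.insert x 0) ∧
            CanB [x] (PySem.Dict.empty.insert x 0) := by
          have := stepB_not_mem CanB_empty (y := x) (by simp)
          simpa using this
        rw [remove_loops_alt, List.foldl_cons, hstep.1]
        by_cases hx : x ∈ rest
        · obtain ⟨u, v, hsplit, hv⟩ := decomp_last hx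
          rw [hsplit, List.foldl_append]
          obtain ⟨t', pos', heqU, hcanU⟩ := foldB_shape u [] _ x hstep.2
          rw [heqU, List.foldl_cons]
          obtain ⟨pos'', heqX, hcanX⟩ := stepB_mem hcanU (y := x) (by simp)
          have hidx : (x :: t').idxOf x = 0 := List.idxOf_cons_self
          rw [hidx] at heqX hcanX
          have htake : (x :: t').take (0 + 1) = [x] := rfl
          rw [htake] at heqX hcanX
          rw [heqX]
          have hshift := foldB_shift v x [] pos'' PySem.Dict.empty hv hcanX CanB_empty
          rw [hshift]
          have hvlen : v.length ≤ n := by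
            have : rest.length = u.length + 1 + v.length := by rw [hsplit]; simp; omega
            simp at hp; omega
          have hres := ih v hvlen
          rw [remove_loops_alt] at hres
          rw [hres]
          have hda : dropA x (u ++ x :: v) = v := dropA_last u v x hv
          rw [specRec_cons, hda]
        · have hshift := foldB_shift rest x [] _ PySem.Dict.empty hx hstep.2 CanB_empty
          rw [hshift]
          have hres := ih rest (by simp at hp; omega)
          rw [remove_loops_alt] at hres
          rw [hres]
          rw [specRec_cons, dropA_of_not_mem hx]
  exact main path.length path le_rfl

-- ===== VERDICT (by name: the statement is the Claim_ definition above) =====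
theorem remove_loops_spec : Claim_equal_remove_loops := by
  intro path _
  unfold Spec_remove_loops
  rw [remove_loops_eq_specRec, remove_loops_alt_eq_specRec]
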